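-- pv_equiv track=rewrite | github.com/wikty/epubgenerator | service/data_cleaner_service.py | clean_article_content
-- ===== SOURCE A (Python) =====
-- def clean_article_content(content):
-- 	l = []
-- 	wc = 0
-- 	for p in content:
-- 		p = p.strip('\n')
-- 		if not p:
-- 			continue
-- 		wc += len(p)
-- 		l.append(p)
-- 	return (l, wc)
-- ===== SOURCE B (Python) =====
-- def clean_article_content(content):
--     def go(xs):
--         if not xs:
--             return ([], 0)
--         if len(xs) == 1:
--             s = xs[0].strip('\n')
--             return (([s], len(s)) if s else ([], 0))
--         mid = len(xs) // 2
--         l1, w1 = go(xs[:mid])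
--         l2, w2 = go(xs[mid:])
--         return (l1 + l2, w1 + w2)
--     return go(content)
-- ===== Notes on version B (the rewrite author's own statement) =====
-- stated objective: alternative
-- what changed: Replaces A's single fused left-to-right filter-and-accumulate loop with a divide-and-conquer recursion that splits the list in half, cleans each half independently, and merges the (list, count) results by concatenation and addition.
import Mathlib
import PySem

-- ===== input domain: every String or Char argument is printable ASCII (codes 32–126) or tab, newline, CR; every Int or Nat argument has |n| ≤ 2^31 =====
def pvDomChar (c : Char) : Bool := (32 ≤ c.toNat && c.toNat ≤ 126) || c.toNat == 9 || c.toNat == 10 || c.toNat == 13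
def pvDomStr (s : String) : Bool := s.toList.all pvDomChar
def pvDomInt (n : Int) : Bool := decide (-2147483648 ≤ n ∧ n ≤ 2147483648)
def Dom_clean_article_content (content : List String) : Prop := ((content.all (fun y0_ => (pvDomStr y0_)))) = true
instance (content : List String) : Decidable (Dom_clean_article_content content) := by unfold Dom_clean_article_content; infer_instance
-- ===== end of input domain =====

-- B replaces A's fused filter-and-accumulate loop with a divide-and-conquer recursion over halves; objective: alternative (same cost).


-- ===== PORT A =====
-- one fused loop: strip, skip empties, accumulate both the list and the running length
def clean_article_content (content : List String) : List String × Int :=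
  content.foldl (fun (st : List String × Int) p =>
    let p' := PySem.Str.stripChars p "\n"
    if p' = "" then st
    else (st.1 ++ [p'], st.2 + PySem.Str.len p')) ([], 0)

-- ===== PORT B =====
-- divide and conquer: split the list in half, clean each half, merge by ++ and +
def pvGo : List String → List String × Int
  | [] => ([], 0)
  | [p] =>
      let s := PySem.Str.stripChars p "\n"
      if s = "" then ([], 0) else ([s], PySem.Str.len s)
  | x :: y :: t =>
      let xs := x :: y :: t
      let mid := xs.length / 2
      let r1 := pvGo (xs.take mid)
      let r2 := pvGo (xs.drop mid)
      (r1.1 ++ r2.1, r1.2 + r2.2)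
termination_by xs => xs.length
decreasing_by
  · simp [List.length_take]; omega
  · simp [List.length_drop]; omega

def clean_article_content_alt (content : List String) : List String × Int :=
  pvGo content

-- ===== PRECONDITION & SPEC =====
def Spec_clean_article_content (content : List String) (out : List String × Int) : Prop := out = clean_article_content_alt content
instance (content : List String) (out : List String × Int) : Decidable (Spec_clean_article_content content out) := by unfold Spec_clean_article_content; infer_instance

-- ===== CLAIM (what is proved, stated in full; the proofs are below) =====
def Claim_equal_clean_article_content : Prop := ∀ (content : List String), Dom_clean_article_content content → Spec_clean_article_content content (clean_article_content content)

-- ===== LEMMAS AND PROOFS =====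
-- the common specification both programs compute
def pvCleanList (xs : List String) : List String :=
  (xs.map (fun p => PySem.Str.stripChars p "\n")).filter (fun s => s ≠ "")

def pvCleanSum (xs : List String) : Int :=
  ((pvCleanList xs).map (fun p => PySem.Str.len p)).sum

theorem pvCleanList_append (a b : List String) :
    pvCleanList (a ++ b) = pvCleanList a ++ pvCleanList b := by
  simp [pvCleanList]

theorem pvCleanSum_append (a b : List String) :
    pvCleanSum (a ++ b) = pvCleanSum a + pvCleanSum b := by
  simp [pvCleanSum, pvCleanList_append]

theorem strip_length (p : String) :
    (PySem.Str.stripChars p "\n").length = (PySem.Chars.stripChars p.toList ['\n']).length := by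
  rw [← String.length_toList, PySem.Str.toList_stripChars]
  simp

theorem pvGo_spec (xs : List String) : pvGo xs = (pvCleanList xs, pvCleanSum xs) := by
  induction xs using pvGo.induct with
  | case1 => simp [pvGo, pvCleanList, pvCleanSum]
  | case2 p s h =>
      simp [pvGo, pvCleanList, pvCleanSum, show PySem.Str.stripChars p "\n" = "" from h]
  | case3 p s h =>
      simp [pvGo, pvCleanList, pvCleanSum, strip_length, PySem.Str.len_eq,
        show ¬PySem.Str.stripChars p "\n" = "" from h]
  | case4 x y t xs mid ih1 ih2 =>
      rw [pvGo, ih1, ih2, ← pvCleanList_append, ← pvCleanSum_append,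
        List.take_append_drop]

theorem clean_fold_acc (content : List String) : ∀ (l : List String) (wc : Int),
    content.foldl (fun (st : List String × Int) p =>
      let p' := PySem.Str.stripChars p "\n"
      if p' = "" then st
      else (st.1 ++ [p'], st.2 + PySem.Str.len p')) (l, wc)
    = (l ++ pvCleanList content, wc + pvCleanSum content) := by
  induction content with
  | nil => intro l wc; simp [pvCleanList, pvCleanSum]
  | cons p t ih =>
    intro l wc
    by_cases h : PySem.Str.stripChars p "\n" = ""
    · simp only [List.foldl_cons, h, reduceIte]
      rw [ih]
      simp [pvCleanList, pvCleanSum, h]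
    · simp only [List.foldl_cons, h, reduceIte]
      rw [ih]
      have hl : pvCleanList (p :: t) = PySem.Str.stripChars p "\n" :: pvCleanList t := by
        simp [pvCleanList, h]
      have hs : pvCleanSum (p :: t) = PySem.Str.len (PySem.Str.stripChars p "\n") + pvCleanSum t := by
        simp [pvCleanSum, hl, PySem.Str.len_eq]
        exact strip_length p
      rw [hl, hs]
      simp [add_assoc]

-- ===== VERDICT (by name: the statement is the Claim_ definition above) =====
theorem clean_article_content_spec : Claim_equal_clean_article_content := by
  intro content _
  show clean_article_content content = clean_article_content_alt content
  unfold clean_article_content clean_article_content_alt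
  rw [clean_fold_acc, pvGo_spec]
  simp
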